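-- pv_equiv track=rewrite | github.com/JulseJiang/DrugKBPrototype | Visualization/Transcript_DNM_visualization.py | GetTransCount
-- ===== SOURCE A (Python) =====
-- def GetTransCount(res):
--     d_list = []
--     for item in res:
--         if 'Trans_Ref' in item.keys():
--             d_list = [item_item for item_item in item['Trans_Ref']]
--         else:
--             d_list = []
--         if 'Trans_Gencode' in item.keys():
--             for item_item in item['Trans_Gencode']:
--                 d_list.append(item_item)
--     return len(d_list)
-- ===== SOURCE B (Python) =====
-- def GetTransCount(res):
--     if not res:
--         return 0
--     item = res[-1]
--     return (len(item['Trans_Ref']) if 'Trans_Ref' in item else 0) \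
--          + (len(item['Trans_Gencode']) if 'Trans_Gencode' in item else 0)
-- ===== Notes on version B (the rewrite author's own statement) =====
-- stated objective: simpler
-- what changed: A's loop overwrites d_list on every iteration, so only the final item matters; B drops the loop entirely and returns the sum of the two key counts of res[-1] (0 for empty res).
import Mathlib
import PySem

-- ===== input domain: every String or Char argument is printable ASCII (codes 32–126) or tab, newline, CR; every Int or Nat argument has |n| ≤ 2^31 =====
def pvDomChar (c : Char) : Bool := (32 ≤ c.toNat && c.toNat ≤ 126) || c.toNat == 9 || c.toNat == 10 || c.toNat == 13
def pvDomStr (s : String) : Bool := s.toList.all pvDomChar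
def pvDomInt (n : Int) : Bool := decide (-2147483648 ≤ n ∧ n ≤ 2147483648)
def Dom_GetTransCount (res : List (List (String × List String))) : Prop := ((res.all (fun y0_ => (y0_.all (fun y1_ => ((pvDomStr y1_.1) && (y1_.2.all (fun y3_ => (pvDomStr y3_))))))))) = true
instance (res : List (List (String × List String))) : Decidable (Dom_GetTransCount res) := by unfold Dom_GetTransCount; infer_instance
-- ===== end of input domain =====

-- B drops A's loop (whose state is overwritten each iteration) and reads only the last item; objective: simpler.

-- ===== PORT A =====
-- the body of A's loop: rebuild d_list from this item (Trans_Ref copy, then append Trans_Gencode)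
def pvGtcStep (_d_list : List String) (item : List (String × List String)) : List String :=
  let d1 : List String :=
    match item.lookup "Trans_Ref" with
    | some l => l.map (fun x => x)          -- [item_item for item_item in item['Trans_Ref']]
    | none => []
  match item.lookup "Trans_Gencode" with
  | some l => l.foldl (fun acc x => acc ++ [x]) d1
  | none => d1

def GetTransCount (res : List (List (String × List String))) : Int :=
  PySem.List.len (res.foldl pvGtcStep [])

-- ===== PORT B =====
def GetTransCount_alt (res : List (List (String × List String))) : Int :=
  match res.getLast? with
  | none => 0
  | some item =>
    (match item.lookup "Trans_Ref" with | some l => PySem.List.len l | none => 0)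
    + (match item.lookup "Trans_Gencode" with | some l => PySem.List.len l | none => 0)

-- ===== PRECONDITION & SPEC =====
def Spec_GetTransCount (res : List (List (String × List String))) (out : Int) : Prop := out = GetTransCount_alt res
instance (res : List (List (String × List String))) (out : Int) : Decidable (Spec_GetTransCount res out) := by unfold Spec_GetTransCount; infer_instance

-- ===== CLAIM (what is proved, stated in full; the proofs are below) =====
def Claim_equal_GetTransCount : Prop := ∀ (res : List (List (String × List String))), Dom_GetTransCount res → Spec_GetTransCount res (GetTransCount res)

-- ===== LEMMAS AND PROOFS =====

-- the loop state is overwritten each iteration: a fold of pvGtcStep over a nonempty list is pvGtcStep of the last item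
theorem pvGtc_foldl_last (res : List (List (String × List String))) (item : List (String × List String)) (s : List String) :
    (item :: res).foldl pvGtcStep s = pvGtcStep [] ((item :: res).getLast (by simp)) := by
  induction res generalizing item s with
  | nil =>
    simp only [List.foldl, List.getLast]
    unfold pvGtcStep; rfl
  | cons b l ih =>
    rw [List.foldl_cons, ih b]
    rfl

-- pvGtcStep builds ref ++ gencode, so its length is the sum of the two key counts
theorem pvGtc_step_len (item : List (String × List String)) :
    PySem.List.len (pvGtcStep [] item) =
      (match item.lookup "Trans_Ref" with | some l => PySem.List.len l | none => 0)
      + (match item.lookup "Trans_Gencode" with | some l => PySem.List.len l | none => 0) := by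
  unfold pvGtcStep
  cases hr : item.lookup "Trans_Ref" <;> cases hg : item.lookup "Trans_Gencode" <;>
    simp only [PySem.List.foldl_append_singleton] <;> simp [PySem.List.len_eq]

-- ===== VERDICT (by name: the statement is the Claim_ definition above) =====
theorem GetTransCount_spec : Claim_equal_GetTransCount := by
  intro res _
  unfold Spec_GetTransCount GetTransCount GetTransCount_alt
  cases res with
  | nil => rfl
  | cons item l =>
    rw [pvGtc_foldl_last, pvGtc_step_len]
    simp [List.getLast?_eq_some_getLast]
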